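-- pv_equiv track=rewrite | github.com/AlphaBravo227/CrewOps360 | modules/track_management/submission.py | count_shifts_by_pay_period_with_at_fixed
-- ===== SOURCE A (Python) =====
-- def count_shifts_by_pay_period_with_at_fixed(track_data, days, staff_preassignments):
--     """
--     FIXED: Count shifts by pay period with proper AT handling
--     """
--     # Make sure days is a list
--     if hasattr(days, 'tolist'):
--         days_list = days.tolist()
--     elif not isinstance(days, list):
--         days_list = list(days)
--     else:
--         days_list = days
--
--     shifts_by_pay_period = []
--
--     # Process each 14-day pay period
--     for i in range(0, len(days_list), 14):
--         period_days = days_list[i:i+14]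
--         period_shifts = 0
--
--         for day in period_days:
--             assignment = None
--
--             # Check track_data first
--             if day in track_data and track_data[day]:
--                 assignment = track_data[day]
--             # Then check preassignments
--             elif staff_preassignments and day in staff_preassignments:
--                 assignment = staff_preassignments[day]
--
--             # Count D, N, and AT as shifts
--             if assignment in ["D", "N", "AT"]:
--                 period_shifts += 1
--
--         shifts_by_pay_period.append(period_shifts)
--
--     return shifts_by_pay_period
-- ===== SOURCE B (Python) =====
-- def count_shifts_by_pay_period_with_at_fixed(track_data, days, staff_preassignments):
--     """Two flat passes: per-day shift indicators, then sums of 14-day chunks."""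
--     # Make sure days is a list (identical normalization)
--     if hasattr(days, 'tolist'):
--         days_list = days.tolist()
--     elif not isinstance(days, list):
--         days_list = list(days)
--     else:
--         days_list = days
--
--     # Pass 1: one indicator per day
--     inds = []
--     for day in days_list:
--         assignment = None
--         if day in track_data and track_data[day]:
--             assignment = track_data[day]
--         elif staff_preassignments and day in staff_preassignments:
--             assignment = staff_preassignments[day]
--         inds.append(1 if assignment in ("D", "N", "AT") else 0)
--
--     # Pass 2: positional 14-day chunk sums
--     result = []
--     for i in range(0, len(inds), 14):
--         result.append(sum(inds[i:i + 14]))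
--     return result
-- ===== Notes on version B (the rewrite author's own statement) =====
-- stated objective: alternative
-- what changed: Replaces the nested period/day loops by two sequential flat passes: one map over all days producing 0/1 shift indicators, then a chunking pass summing consecutive 14-slices of that indicator list.
import Mathlib
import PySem

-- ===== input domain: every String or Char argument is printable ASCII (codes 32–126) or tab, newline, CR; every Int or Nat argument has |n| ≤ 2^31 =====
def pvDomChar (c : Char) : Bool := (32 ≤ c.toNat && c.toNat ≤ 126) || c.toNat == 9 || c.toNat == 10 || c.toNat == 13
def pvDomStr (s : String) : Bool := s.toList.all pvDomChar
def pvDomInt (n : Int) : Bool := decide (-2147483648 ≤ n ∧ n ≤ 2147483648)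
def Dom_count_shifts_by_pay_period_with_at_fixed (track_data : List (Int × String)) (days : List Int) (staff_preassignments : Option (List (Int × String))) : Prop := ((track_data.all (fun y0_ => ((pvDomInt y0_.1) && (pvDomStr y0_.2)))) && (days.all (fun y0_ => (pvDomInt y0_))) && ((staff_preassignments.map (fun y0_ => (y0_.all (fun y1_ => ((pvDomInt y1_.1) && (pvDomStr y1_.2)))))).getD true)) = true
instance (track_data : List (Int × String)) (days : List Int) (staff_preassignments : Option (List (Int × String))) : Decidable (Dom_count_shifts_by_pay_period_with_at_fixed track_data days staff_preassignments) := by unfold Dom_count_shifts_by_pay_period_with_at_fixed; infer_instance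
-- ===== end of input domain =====

-- B replaces the nested period/day loops by two flat passes (per-day 0/1 indicators, then 14-chunk sums); same cost, different decomposition.

-- Shared helper: the per-day assignment-resolution lines are textually identical in both
-- Python sources ('if day in track_data and track_data[day]: … elif staff_preassignments and
-- day in staff_preassignments: …' then membership in ["D","N","AT"]), transcribed once.
-- dict lookup = first match in the association list; truthiness: non-empty string / non-empty dict.
def pvIsShift (track_data : List (Int × String)) (staff_preassignments : Option (List (Int × String))) (day : Int) : Bool :=
  let tv : Option String := (track_data.find? (fun p => p.1 == day)).map (·.2)
  let assignment : Option String :=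
    if tv.getD "" ≠ "" then tv
    else match staff_preassignments with
      | some spl =>
          if !spl.isEmpty then (spl.find? (fun p => p.1 == day)).map (·.2)
          else none
      | none => none
  assignment == some "D" || assignment == some "N" || assignment == some "AT"

-- ===== PORT A =====
-- nested loops: for each 14-day window of `days`, an inner counting loop
def count_shifts_by_pay_period_with_at_fixed (track_data : List (Int × String)) (days : List Int) (staff_preassignments : Option (List (Int × String))) : List Int :=
  (PySem.List.pyRange 0 (days.length : Int) 14).foldl (fun shifts_by_pay_period i =>
    let period_days := PySem.List.slice days (some i) (some (i + 14))
    let period_shifts := period_days.foldl (fun c day =>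
      if pvIsShift track_data staff_preassignments day then c + 1 else c) (0 : Int)
    shifts_by_pay_period ++ [period_shifts]) []

-- ===== PORT B =====
-- pass 1: one 0/1 indicator per day; pass 2: sums of consecutive 14-slices
def count_shifts_by_pay_period_with_at_fixed_alt (track_data : List (Int × String)) (days : List Int) (staff_preassignments : Option (List (Int × String))) : List Int :=
  let inds : List Int := days.map (fun day => if pvIsShift track_data staff_preassignments day then 1 else 0)
  (PySem.List.pyRange 0 (inds.length : Int) 14).foldl (fun result i =>
    result ++ [(PySem.List.slice inds (some i) (some (i + 14))).sum]) []

-- ===== PRECONDITION & SPEC =====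
def Spec_count_shifts_by_pay_period_with_at_fixed (track_data : List (Int × String)) (days : List Int) (staff_preassignments : Option (List (Int × String))) (out : List Int) : Prop := out = count_shifts_by_pay_period_with_at_fixed_alt track_data days staff_preassignments
instance (track_data : List (Int × String)) (days : List Int) (staff_preassignments : Option (List (Int × String))) (out : List Int) : Decidable (Spec_count_shifts_by_pay_period_with_at_fixed track_data days staff_preassignments out) := by unfold Spec_count_shifts_by_pay_period_with_at_fixed; infer_instance

-- ===== CLAIM (what is proved, stated in full; the proofs are below) =====
def Claim_equal_count_shifts_by_pay_period_with_at_fixed : Prop := ∀ (track_data : List (Int × String)) (days : List Int) (staff_preassignments : Option (List (Int × String))), Dom_count_shifts_by_pay_period_with_at_fixed track_data days staff_preassignments → Spec_count_shifts_by_pay_period_with_at_fixed track_data days staff_preassignments (count_shifts_by_pay_period_with_at_fixed track_data days staff_preassignments)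

-- ===== LEMMAS AND PROOFS =====

-- one 14-day window: A's counting loop equals B's sum of the sliced indicator list
lemma pv_window_eq (track_data : List (Int × String)) (days : List Int)
    (staff_preassignments : Option (List (Int × String))) (i : Int) (hi : 0 ≤ i) :
    (PySem.List.slice days (some i) (some (i + 14))).foldl (fun c day =>
      if pvIsShift track_data staff_preassignments day then c + 1 else c) (0 : Int)
    = (PySem.List.slice (days.map (fun day => if pvIsShift track_data staff_preassignments day then (1 : Int) else 0)) (some i) (some (i + 14))).sum := by
  rw [PySem.List.foldl_if_add_one]
  rw [PySem.List.slice_toNat _ hi (by omega), PySem.List.slice_toNat _ hi (by omega)]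
  rw [← List.map_drop, ← List.map_take]
  rw [PySem.List.sum_map_ite_one_zero]
  simp

-- ===== VERDICT (by name: the statement is the Claim_ definition above) =====
theorem count_shifts_by_pay_period_with_at_fixed_spec : Claim_equal_count_shifts_by_pay_period_with_at_fixed := by
  intro track_data days staff_preassignments _
  unfold Spec_count_shifts_by_pay_period_with_at_fixed
  unfold count_shifts_by_pay_period_with_at_fixed count_shifts_by_pay_period_with_at_fixed_alt
  simp only [List.length_map]
  apply PySem.List.foldl_congr_mem
  intro acc i hi
  have h0 : 0 ≤ i := by
    have := (PySem.List.mem_pyRange_iff_of_pos (by norm_num : (0:Int) < 14) i).1 hi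
    omega
  simp only [pv_window_eq track_data days staff_preassignments i h0]
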